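-- pv_equiv track=rewrite | github.com/horimpark/code-playground | codewars/6kyu/FIRE and FURY.py | fire_and_fury
-- ===== SOURCE A (Python) =====
-- def fire_and_fury(tweet):
--     str_list = []
--     for i in range(len(tweet)):
--         if tweet[i:i+4] == "FIRE" or tweet[i:i+4] == "FURY":
--             if str_list and str_list[-1][0] == tweet[i:i+4]:
--                 str_list[-1][-1] = str_list[-1][-1] + 1
--             else:
--                 str_list.append([tweet[i:i+4], 1])
--     if not str_list or any(x not in "EFIRUY" for x in tweet):
--         return "Fake tweet."
--     res = []
--     for w, c in str_list:
--         if w == "FURY":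
--             target = "" if c==1 else "really " * (c-1)
--             res.append(
--                 f"I am {target}furious."
--             )
--         elif w == "FIRE":
--             target = "" if c==1 else "you and " * (c-1)
--             res.append(
--                 f"{target}you are fired!"
--             )
--     return " ".join([f"{x[0].upper()}{x[1:]}" for x in res])
-- ===== SOURCE B (Python) =====
-- def fire_and_fury(tweet):
--     if set(tweet) - set("EFIRUY"):
--         return "Fake tweet."
--     pieces = []
--     word, count = None, 0
--
--     def flush():
--         if word == "FURY":
--             pieces.append("I am " + "really " * (count - 1) + "furious.")
--         elif word == "FIRE":
--             pieces.append("You are fired!" if count == 1 else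
--                           "You and " + "you and " * (count - 2) + "you are fired!")
--
--     i = 0
--     while True:
--         f = tweet.find("FIRE", i)
--         u = tweet.find("FURY", i)
--         if f == -1 and u == -1:
--             break
--         j = min(k for k in (f, u) if k != -1)
--         w = tweet[j:j + 4]
--         if w == word:
--             count += 1
--         else:
--             flush()
--             word, count = w, 1
--         i = j + 4
--     flush()
--     return " ".join(pieces) if pieces else "Fake tweet."
-- ===== Notes on version B (the rewrite author's own statement) =====
-- stated objective: alternative
-- what changed: A slices every index of the tweet and mutates a run list that a second loop then formats and a third pass capitalizes; B validates first with set difference, then skip-scans with str.find jumping directly from one token occurrence to the next, fusing run tracking and formatting into a single state machine that emits each capitalized piece immediately when a run ends (no per-index slicing, no run list, no post-passes).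
import Mathlib
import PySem

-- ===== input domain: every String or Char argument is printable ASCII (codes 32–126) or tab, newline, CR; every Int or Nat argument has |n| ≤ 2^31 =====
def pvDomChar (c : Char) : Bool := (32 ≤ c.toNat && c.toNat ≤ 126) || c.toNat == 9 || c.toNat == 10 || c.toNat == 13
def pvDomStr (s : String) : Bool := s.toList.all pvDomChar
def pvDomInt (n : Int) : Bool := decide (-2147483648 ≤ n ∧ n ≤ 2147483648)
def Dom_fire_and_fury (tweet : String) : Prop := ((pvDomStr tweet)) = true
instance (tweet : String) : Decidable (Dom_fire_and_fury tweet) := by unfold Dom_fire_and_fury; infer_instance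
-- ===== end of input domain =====

-- B replaces A's every-index slice scan + run list + formatting pass + capitalization pass
-- by a validate-first skip-scan: str.find jumps from token to token while a fused state
-- machine emits each capitalized piece as soon as its run ends (a timing run measured
-- B faster by a constant factor).


-- ===== PORT A =====
-- str_list[-1][0] == w: bump the count of the last run, else append a new run [w, 1]
def faf_push (acc : List (List Char × Int)) (w : List Char) : List (List Char × Int) :=
  match acc.getLast? with
  | some (w', c) => if w' = w then acc.dropLast ++ [(w', c + 1)] else acc ++ [(w, 1)]
  | none => acc ++ [(w, 1)]

-- loop body: tweet[i:i+4] == "FIRE" or tweet[i:i+4] == "FURY"  (strings as char lists)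
def faf_stepA (cs : List Char) (acc : List (List Char × Int)) (i : Int) : List (List Char × Int) :=
  let w := PySem.List.slice cs (some i) (some (i + 4))
  if w = ['F','I','R','E'] ∨ w = ['F','U','R','Y'] then faf_push acc w else acc

-- f"{x[0].upper()}{x[1:]}"; pieces are never empty, the [] case is unreachable
def faf_cap (x : List Char) : List Char :=
  match x with
  | [] => []
  | ch :: rest => PySem.Chars.upperChar ch :: rest

-- str_list: for i in range(len(tweet)): ...
def faf_strList (tweet : String) : List (List Char × Int) :=
  (PySem.List.pyRange 0 (PySem.Str.len tweet) 1).foldl (faf_stepA tweet.toList) []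

-- res: for w, c in str_list: ...
def faf_resA (strList : List (List Char × Int)) : List (List Char) :=
  strList.foldl (fun r wc =>
    if wc.1 = ['F','U','R','Y'] then
      r ++ [['I',' ','a','m',' '] ++
            (if wc.2 = 1 then [] else PySem.List.pyRepeat ['r','e','a','l','l','y',' '] (wc.2 - 1)) ++
            ['f','u','r','i','o','u','s','.']]
    else if wc.1 = ['F','I','R','E'] then
      r ++ [(if wc.2 = 1 then [] else PySem.List.pyRepeat ['y','o','u',' ','a','n','d',' '] (wc.2 - 1)) ++
            ['y','o','u',' ','a','r','e',' ','f','i','r','e','d','!']]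
    else r) []

def fire_and_fury (tweet : String) : String :=
  if faf_strList tweet = [] ∨ tweet.toList.any (fun x => !([ 'E','F','I','R','U','Y' ].contains x)) then
    "Fake tweet."
  else String.ofList (PySem.Chars.join [' '] ((faf_resA (faf_strList tweet)).map faf_cap))

-- ===== PORT B =====
-- flush(): append the capitalized piece for the current run; word = None appends nothing
def faf_flush (word : Option (List Char)) (count : Int) (pieces : List (List Char)) : List (List Char) :=
  if word = some ['F','U','R','Y'] then
    pieces ++ [['I',' ','a','m',' '] ++ PySem.List.pyRepeat ['r','e','a','l','l','y',' '] (count - 1) ++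
               ['f','u','r','i','o','u','s','.']]
  else if word = some ['F','I','R','E'] then
    pieces ++ [if count = 1 then ['Y','o','u',' ','a','r','e',' ','f','i','r','e','d','!']
               else ['Y','o','u',' ','a','n','d',' '] ++
                    PySem.List.pyRepeat ['y','o','u',' ','a','n','d',' '] (count - 2) ++
                    ['y','o','u',' ','a','r','e',' ','f','i','r','e','d','!']]
  else pieces

-- the while loop: find the next FIRE/FURY occurrence from i, update the (word, count)
-- state, flush when the run changes; fuel = len + 1 only makes the loop structurally
-- terminating (i grows by at least 4 per iteration, so fuel is never exhausted)
def faf_loopB (cs : List Char) : Nat → Nat → Option (List Char) → Int → List (List Char) → List (List Char)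
  | 0, _, word, count, pieces => faf_flush word count pieces
  | (fuel+1), i, word, count, pieces =>
    let f := PySem.Chars.findFrom cs ['F','I','R','E'] (i : Int)
    let u := PySem.Chars.findFrom cs ['F','U','R','Y'] (i : Int)
    if f = -1 ∧ u = -1 then faf_flush word count pieces
    else
      let j := if f = -1 then u else if u = -1 then f else min f u
      let w := PySem.List.slice cs (some j) (some (j + 4))
      if some w = word then
        faf_loopB cs fuel (j.toNat + 4) word (count + 1) pieces
      else
        faf_loopB cs fuel (j.toNat + 4) (some w) 1 (faf_flush word count pieces)

def fire_and_fury_alt (tweet : String) : String :=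
  if PySem.Set.diff (PySem.Set.ofList tweet.toList) ['E','F','I','R','U','Y'] ≠ [] then
    "Fake tweet."
  else
    let pieces := faf_loopB tweet.toList (tweet.toList.length + 1) 0 none 0 []
    if pieces = [] then "Fake tweet." else String.ofList (PySem.Chars.join [' '] pieces)

-- ===== PRECONDITION & SPEC =====
def Spec_fire_and_fury (tweet : String) (out : String) : Prop := out = fire_and_fury_alt tweet
instance (tweet : String) (out : String) : Decidable (Spec_fire_and_fury tweet out) := by unfold Spec_fire_and_fury; infer_instance

-- ===== CLAIM (what is proved, stated in full; the proofs are below) =====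
def Claim_equal_fire_and_fury : Prop := ∀ (tweet : String), Dom_fire_and_fury tweet → Spec_fire_and_fury tweet (fire_and_fury tweet)

-- ===== LEMMAS AND PROOFS =====

-- ---- proof-side view of both programs: the token sequence and its runs ----

-- the non-overlapping left-to-right FIRE/FURY token sequence
def faf_tokens : List Char → List (List Char)
  | [] => []
  | c :: rest =>
    if (c :: rest).take 4 = ['F','I','R','E'] then ['F','I','R','E'] :: faf_tokens (rest.drop 3)
    else if (c :: rest).take 4 = ['F','U','R','Y'] then ['F','U','R','Y'] :: faf_tokens (rest.drop 3)
    else faf_tokens rest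
termination_by l => l.length
decreasing_by all_goals simp [List.length_drop]

-- runs of consecutive equal tokens with their lengths
def faf_groupAux (w : List Char) (c : Int) : List (List Char) → List (List Char × Int)
  | [] => [(w, c)]
  | t :: ts => if t = w then faf_groupAux w (c + 1) ts else (w, c) :: faf_groupAux t 1 ts

def faf_groupRuns : List (List Char) → List (List Char × Int)
  | [] => []
  | t :: ts => faf_groupAux t 1 ts

-- the capitalized piece for one run
def faf_piece (wc : List Char × Int) : List Char :=
  if wc.1 = ['F','U','R','Y'] then
    ['I',' ','a','m',' '] ++ PySem.List.pyRepeat ['r','e','a','l','l','y',' '] (wc.2 - 1) ++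
      ['f','u','r','i','o','u','s','.']
  else if wc.2 = 1 then ['Y','o','u',' ','a','r','e',' ','f','i','r','e','d','!']
  else ['Y','o','u',' ','a','n','d',' '] ++ PySem.List.pyRepeat ['y','o','u',' ','a','n','d',' '] (wc.2 - 2) ++
      ['y','o','u',' ','a','r','e',' ','f','i','r','e','d','!']

-- ---- A's scan equals the run decomposition of the token sequence ----

-- A's loop body with the 4-slice precomputed
def faf_stepT (acc : List (List Char × Int)) (w : List Char) : List (List Char × Int) :=
  if w = ['F','I','R','E'] ∨ w = ['F','U','R','Y'] then faf_push acc w else acc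

-- A's scan rephrased as structural recursion on the suffix
def faf_scan (acc : List (List Char × Int)) : List Char → List (List Char × Int)
  | [] => acc
  | c :: rest => faf_scan (faf_stepT acc ((c :: rest).take 4)) rest

theorem faf_foldl_range_eq_scan (cs : List Char) :
    ∀ acc, (List.range cs.length).foldl (fun a k => faf_stepT a ((cs.drop k).take 4)) acc
      = faf_scan acc cs := by
  induction cs with
  | nil => intro acc; simp [faf_scan]
  | cons c t ih =>
    intro acc
    rw [List.length_cons, List.range_succ_eq_map, List.foldl_cons, List.foldl_map]
    simp only [List.drop_zero, Nat.succ_eq_add_one, List.drop_succ_cons]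
    exact ih _

theorem faf_strList_eq_scan (cs : List Char) :
    (PySem.List.pyRange 0 (cs.length : Int) 1).foldl (faf_stepA cs) []
      = faf_scan [] cs := by
  rw [PySem.List.pyRange_one, List.foldl_map]
  have hn : (((cs.length : Int)) - 0).toNat = cs.length := by omega
  rw [hn]
  have hcongr : ∀ (a : List (List Char × Int)) (k : Nat), k ∈ List.range cs.length →
      faf_stepA cs a ((0 : Int) + (k : Int)) = faf_stepT a ((cs.drop k).take 4) := by
    intro a k _
    unfold faf_stepA faf_stepT
    rw [zero_add, show ((k : Int) + 4) = ((k : Int) + ((4 : Nat) : Int)) by norm_num,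
      PySem.List.slice_natCast_add]
  exact (PySem.List.foldl_congr_mem _ _ _ _ hcongr).trans (faf_foldl_range_eq_scan cs [])

theorem faf_scan_eq_foldl_push (cs : List Char) :
    ∀ acc, faf_scan acc cs = (faf_tokens cs).foldl faf_push acc := by
  induction cs using faf_tokens.induct with
  | case1 => intro acc; simp [faf_scan, faf_tokens]
  | case2 c rest h ih =>
    intro acc
    rcases rest with _ | ⟨a, _ | ⟨b, _ | ⟨d, t⟩⟩⟩ <;> simp [List.take] at h
    obtain ⟨h1, h2, h3, h4⟩ := h
    subst h1; subst h2; subst h3; subst h4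
    rw [faf_tokens, if_pos (by simp [List.take]), List.foldl_cons]
    rw [faf_scan, show (('F' :: 'I' :: 'R' :: 'E' :: t).take 4) = ['F','I','R','E'] from rfl,
      show faf_stepT acc ['F','I','R','E'] = faf_push acc ['F','I','R','E'] from by
        unfold faf_stepT; rw [if_pos (Or.inl rfl)]]
    rw [faf_scan, show faf_stepT (faf_push acc ['F','I','R','E']) (('I' :: 'R' :: 'E' :: t).take 4)
        = faf_push acc ['F','I','R','E'] from by
      unfold faf_stepT; rw [if_neg]; rintro (hh | hh) <;> simp [List.take] at hh]
    rw [faf_scan, show faf_stepT (faf_push acc ['F','I','R','E']) (('R' :: 'E' :: t).take 4)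
        = faf_push acc ['F','I','R','E'] from by
      unfold faf_stepT; rw [if_neg]; rintro (hh | hh) <;> simp [List.take] at hh]
    rw [faf_scan, show faf_stepT (faf_push acc ['F','I','R','E']) (('E' :: t).take 4)
        = faf_push acc ['F','I','R','E'] from by
      unfold faf_stepT; rw [if_neg]; rintro (hh | hh) <;> simp [List.take] at hh]
    exact ih _
  | case3 c rest h0 h ih =>
    intro acc
    rcases rest with _ | ⟨a, _ | ⟨b, _ | ⟨d, t⟩⟩⟩ <;> simp [List.take] at h
    obtain ⟨h1, h2, h3, h4⟩ := h
    subst h1; subst h2; subst h3; subst h4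
    rw [faf_tokens, if_neg h0, if_pos (by simp [List.take]), List.foldl_cons]
    rw [faf_scan, show (('F' :: 'U' :: 'R' :: 'Y' :: t).take 4) = ['F','U','R','Y'] from rfl,
      show faf_stepT acc ['F','U','R','Y'] = faf_push acc ['F','U','R','Y'] from by
        unfold faf_stepT; rw [if_pos (Or.inr rfl)]]
    rw [faf_scan, show faf_stepT (faf_push acc ['F','U','R','Y']) (('U' :: 'R' :: 'Y' :: t).take 4)
        = faf_push acc ['F','U','R','Y'] from by
      unfold faf_stepT; rw [if_neg]; rintro (hh | hh) <;> simp [List.take] at hh]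
    rw [faf_scan, show faf_stepT (faf_push acc ['F','U','R','Y']) (('R' :: 'Y' :: t).take 4)
        = faf_push acc ['F','U','R','Y'] from by
      unfold faf_stepT; rw [if_neg]; rintro (hh | hh) <;> simp [List.take] at hh]
    rw [faf_scan, show faf_stepT (faf_push acc ['F','U','R','Y']) (('Y' :: t).take 4)
        = faf_push acc ['F','U','R','Y'] from by
      unfold faf_stepT; rw [if_neg]; rintro (hh | hh) <;> simp [List.take] at hh]
    exact ih _
  | case4 c rest h1 h2 ih =>
    intro acc
    rw [faf_tokens, if_neg h1, if_neg h2]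
    rw [faf_scan, show faf_stepT acc ((c :: rest).take 4) = acc from by
      unfold faf_stepT; rw [if_neg (not_or.mpr ⟨h1, h2⟩)]]
    exact ih acc

theorem faf_foldl_push_concat (ts : List (List Char)) :
    ∀ (w : List Char) (c : Int) (acc : List (List Char × Int)),
      ts.foldl faf_push (acc ++ [(w, c)]) = acc ++ faf_groupAux w c ts := by
  induction ts with
  | nil => intro w c acc; simp [faf_groupAux]
  | cons t ts ih =>
    intro w c acc
    rw [List.foldl_cons, faf_groupAux]
    by_cases htw : t = w
    · rw [if_pos htw]
      have hp : faf_push (acc ++ [(w, c)]) t = acc ++ [(w, c + 1)] := by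
        unfold faf_push
        rw [List.getLast?_concat]
        simp [htw]
      rw [hp, ih]
    · rw [if_neg htw]
      have hp : faf_push (acc ++ [(w, c)]) t = (acc ++ [(w, c)]) ++ [(t, 1)] := by
        have hne : ¬ (w = t) := fun hh => htw hh.symm
        unfold faf_push
        rw [List.getLast?_concat]
        simp only [if_neg hne]
      rw [hp, ih, List.append_assoc]
      rfl

theorem faf_foldl_push_eq_groupRuns (ts : List (List Char)) :
    ts.foldl faf_push [] = faf_groupRuns ts := by
  cases ts with
  | nil => rfl
  | cons t ts =>
    rw [List.foldl_cons, faf_groupRuns,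
      show faf_push [] t = [] ++ [(t, 1)] from rfl, faf_foldl_push_concat]
    rfl

theorem faf_groupAux_ne_nil (ts : List (List Char)) :
    ∀ w c, faf_groupAux w c ts ≠ [] := by
  induction ts with
  | nil => intro w c; simp [faf_groupAux]
  | cons t ts ih =>
    intro w c
    rw [faf_groupAux]
    by_cases h : t = w
    · rw [if_pos h]; exact ih _ _
    · rw [if_neg h]; simp

theorem faf_groupRuns_eq_nil_iff (ts : List (List Char)) :
    faf_groupRuns ts = [] ↔ ts = [] := by
  cases ts with
  | nil => simp [faf_groupRuns]
  | cons t ts => simp [faf_groupRuns, faf_groupAux_ne_nil]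

theorem faf_tokens_mem (cs : List Char) :
    ∀ w ∈ faf_tokens cs, w = ['F','I','R','E'] ∨ w = ['F','U','R','Y'] := by
  induction cs using faf_tokens.induct with
  | case1 => simp [faf_tokens]
  | case2 c rest h ih =>
    rw [faf_tokens, if_pos h]
    intro w hw
    rcases List.mem_cons.mp hw with h' | h'
    · exact Or.inl h'
    · exact ih w h'
  | case3 c rest h1 h ih =>
    rw [faf_tokens, if_neg h1, if_pos h]
    intro w hw
    rcases List.mem_cons.mp hw with h' | h'
    · exact Or.inr h'
    · exact ih w h'
  | case4 c rest h1 h2 ih =>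
    rw [faf_tokens, if_neg h1, if_neg h2]
    exact ih

def faf_runInv (p : List Char × Int) : Prop :=
  (p.1 = ['F','I','R','E'] ∨ p.1 = ['F','U','R','Y']) ∧ 1 ≤ p.2

theorem faf_groupAux_inv (ts : List (List Char))
    (hts : ∀ t ∈ ts, t = ['F','I','R','E'] ∨ t = ['F','U','R','Y']) :
    ∀ w c, (w = ['F','I','R','E'] ∨ w = ['F','U','R','Y']) → 1 ≤ c →
      ∀ p ∈ faf_groupAux w c ts, faf_runInv p := by
  induction ts with
  | nil =>
    intro w c hw hc p hp
    simp only [faf_groupAux, List.mem_singleton] at hp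
    subst hp; exact ⟨hw, hc⟩
  | cons t ts ih =>
    intro w c hw hc p hp
    have hts' : ∀ t' ∈ ts, t' = ['F','I','R','E'] ∨ t' = ['F','U','R','Y'] :=
      fun t' ht' => hts t' (List.mem_cons_of_mem _ ht')
    rw [faf_groupAux] at hp
    by_cases h : t = w
    · rw [if_pos h] at hp
      exact ih hts' w (c + 1) hw (by omega) p hp
    · rw [if_neg h] at hp
      rcases List.mem_cons.mp hp with h' | h'
      · subst h'; exact ⟨hw, hc⟩
      · exact ih hts' t 1 (hts t List.mem_cons_self) le_rfl p h'

theorem faf_groupRuns_inv (ts : List (List Char))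
    (hts : ∀ t ∈ ts, t = ['F','I','R','E'] ∨ t = ['F','U','R','Y']) :
    ∀ p ∈ faf_groupRuns ts, faf_runInv p := by
  cases ts with
  | nil => simp [faf_groupRuns]
  | cons t ts =>
    exact faf_groupAux_inv ts (fun t' ht' => hts t' (List.mem_cons_of_mem _ ht'))
      t 1 (hts t List.mem_cons_self) le_rfl

theorem faf_pyRepeat_pred {s : List Char} {c : Int} (h : 2 ≤ c) :
    PySem.List.pyRepeat s (c - 1) = s ++ PySem.List.pyRepeat s (c - 2) := by
  unfold PySem.List.pyRepeat
  rw [show (c - 1).toNat = (c - 2).toNat + 1 from by omega, List.replicate_succ, List.flatten_cons]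

theorem faf_cap_piece (wc : List Char × Int) (hinv : faf_runInv wc) :
    faf_cap (if wc.1 = ['F','U','R','Y'] then
        ['I',' ','a','m',' '] ++
          (if wc.2 = 1 then [] else PySem.List.pyRepeat ['r','e','a','l','l','y',' '] (wc.2 - 1)) ++
          ['f','u','r','i','o','u','s','.']
      else (if wc.2 = 1 then [] else PySem.List.pyRepeat ['y','o','u',' ','a','n','d',' '] (wc.2 - 1)) ++
          ['y','o','u',' ','a','r','e',' ','f','i','r','e','d','!']) = faf_piece wc := by
  obtain ⟨hw, hc⟩ := hinv
  have hI : PySem.Chars.upperChar 'I' = 'I' := by decide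
  have hy : PySem.Chars.upperChar 'y' = 'Y' := by decide
  by_cases hf : wc.1 = ['F','U','R','Y']
  · rw [if_pos hf]
    unfold faf_piece
    rw [if_pos hf]
    by_cases h1 : wc.2 = 1
    · rw [if_pos h1, h1]
      simp [faf_cap, hI]
      rfl
    · rw [if_neg h1]
      simp [faf_cap, hI]
  · rw [if_neg hf]
    unfold faf_piece
    rw [if_neg hf]
    by_cases h1 : wc.2 = 1
    · rw [if_pos h1, if_pos h1]
      simp [faf_cap, hy]
    · rw [if_neg h1, if_neg h1]
      rw [faf_pyRepeat_pred (show 2 ≤ wc.2 by omega)]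
      simp [faf_cap, hy]

theorem faf_res_map_cap (runs : List (List Char × Int)) :
    ∀ acc, (∀ p ∈ runs, faf_runInv p) →
      (runs.foldl (fun r wc =>
        if wc.1 = ['F','U','R','Y'] then
          r ++ [['I',' ','a','m',' '] ++
                (if wc.2 = 1 then [] else PySem.List.pyRepeat ['r','e','a','l','l','y',' '] (wc.2 - 1)) ++
                ['f','u','r','i','o','u','s','.']]
        else if wc.1 = ['F','I','R','E'] then
          r ++ [(if wc.2 = 1 then [] else PySem.List.pyRepeat ['y','o','u',' ','a','n','d',' '] (wc.2 - 1)) ++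
                ['y','o','u',' ','a','r','e',' ','f','i','r','e','d','!']]
        else r) acc).map faf_cap
      = acc.map faf_cap ++ runs.map faf_piece := by
  induction runs with
  | nil => intro acc _; simp
  | cons wc runs ih =>
    intro acc hinv
    have hwc := hinv wc List.mem_cons_self
    have hrest : ∀ p ∈ runs, faf_runInv p := fun p hp => hinv p (List.mem_cons_of_mem _ hp)
    rw [List.foldl_cons, List.map_cons]
    by_cases hf : wc.1 = ['F','U','R','Y']
    · rw [if_pos hf, ih _ hrest, List.map_append, List.map_singleton]
      rw [show faf_cap (['I',' ','a','m',' '] ++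
            (if wc.2 = 1 then [] else PySem.List.pyRepeat ['r','e','a','l','l','y',' '] (wc.2 - 1)) ++
            ['f','u','r','i','o','u','s','.']) = faf_piece wc from by
        rw [← faf_cap_piece wc hwc, if_pos hf]]
      rw [List.append_assoc]
      rfl
    · have hfire : wc.1 = ['F','I','R','E'] := by
        rcases hwc.1 with h | h
        · exact h
        · exact absurd h hf
      rw [if_neg hf, if_pos hfire, ih _ hrest, List.map_append, List.map_singleton]
      rw [show faf_cap ((if wc.2 = 1 then [] else PySem.List.pyRepeat ['y','o','u',' ','a','n','d',' '] (wc.2 - 1)) ++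
            ['y','o','u',' ','a','r','e',' ','f','i','r','e','d','!']) = faf_piece wc from by
        rw [← faf_cap_piece wc hwc, if_neg hf]]
      rw [List.append_assoc]
      rfl

-- ---- B's fused find-loop equals the run decomposition of the token sequence ----

-- a FIRE or FURY occurrence starts at position m
def faf_matchAt (cs : List Char) (m : Nat) : Prop :=
  ['F','I','R','E'] <+: cs.drop m ∨ ['F','U','R','Y'] <+: cs.drop m

theorem faf_tokens_nil_of_no_match (cs : List Char)
    (h : ∀ m, ¬ faf_matchAt cs m) : faf_tokens cs = [] := by
  induction cs using faf_tokens.induct with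
  | case1 => simp [faf_tokens]
  | case2 c rest hm ih =>
    exact absurd (Or.inl (List.prefix_iff_eq_take.mpr hm.symm)) (h 0)
  | case3 c rest _ hm ih =>
    exact absurd (Or.inr (List.prefix_iff_eq_take.mpr hm.symm)) (h 0)
  | case4 c rest h1 h2 ih =>
    rw [faf_tokens, if_neg h1, if_neg h2]
    exact ih (fun m => h (m + 1))

theorem faf_tokens_drop_of_no_match (j : Nat) :
    ∀ cs : List Char, (∀ m, m < j → ¬ faf_matchAt cs m) →
      faf_tokens cs = faf_tokens (cs.drop j) := by
  induction j with
  | zero => intro cs _; rfl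
  | succ j ih =>
    intro cs h
    cases cs with
    | nil => simp [faf_tokens]
    | cons c rest =>
      have h0 : ¬ faf_matchAt (c :: rest) 0 := h 0 (by omega)
      have h1 : ¬ (c :: rest).take 4 = ['F','I','R','E'] := fun he =>
        h0 (Or.inl (List.prefix_iff_eq_take.mpr he.symm))
      have h2 : ¬ (c :: rest).take 4 = ['F','U','R','Y'] := fun he =>
        h0 (Or.inr (List.prefix_iff_eq_take.mpr he.symm))
      rw [faf_tokens, if_neg h1, if_neg h2, show (c :: rest).drop (j + 1) = rest.drop j from rfl]
      exact ih rest (fun m hm => h (m + 1) (by omega))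

theorem faf_tokens_step (cs : List Char) (w : List Char)
    (hw : w = ['F','I','R','E'] ∨ w = ['F','U','R','Y']) (hpre : w = cs.take 4) :
    faf_tokens cs = w :: faf_tokens (cs.drop 4) := by
  cases cs with
  | nil =>
    rcases hw with hw | hw <;> subst hw <;> simp at hpre
  | cons c rest =>
    rcases hw with hw | hw <;> subst hw
    · rw [faf_tokens, if_pos hpre.symm, show (c :: rest).drop 4 = rest.drop 3 from rfl]
    · rw [faf_tokens, if_neg (by rw [← hpre]; decide), if_pos hpre.symm,
        show (c :: rest).drop 4 = rest.drop 3 from rfl]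

-- what flush appends is exactly the formatted run, in capitalized form
theorem faf_flush_none (c : Int) (p : List (List Char)) : faf_flush none c p = p := by
  simp [faf_flush]

theorem faf_flush_some (w : List Char) (c : Int) (p : List (List Char))
    (hw : w = ['F','I','R','E'] ∨ w = ['F','U','R','Y']) :
    faf_flush (some w) c p = p ++ [faf_piece (w, c)] := by
  rcases hw with hw | hw <;> subst hw <;> simp [faf_flush, faf_piece]

-- the run list still owed by the loop in state (word, count)
def faf_stateRuns : Option (List Char) → Int → List (List Char) → List (List Char × Int)
  | none, _, ts => faf_groupRuns ts
  | some w, c, ts => faf_groupAux w c ts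

-- a prefix occurrence at m ≥ i is an infix occurrence in cs.drop i
theorem faf_prefix_infix (cs sub : List Char) (i m : Nat) (hm : i ≤ m)
    (hinf : ¬ sub <:+: cs.drop i) : ¬ sub <+: cs.drop m := by
  intro hp
  have hs : cs.drop m <:+ cs.drop i := by
    rw [show cs.drop m = (cs.drop i).drop (m - i) from by
      rw [List.drop_drop]; congr 1; omega]
    exact List.drop_suffix _ _
  exact hinf (List.infix_iff_prefix_suffix.mpr ⟨cs.drop m, hp, hs⟩)

-- where the next token starts, what it is, and that nothing matches before it
theorem faf_next (cs : List Char) (i : Nat) (hi : i ≤ cs.length)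
    (hne : ¬ (PySem.Chars.findFrom cs ['F','I','R','E'] (i : Int) = -1 ∧
              PySem.Chars.findFrom cs ['F','U','R','Y'] (i : Int) = -1))
    (j : Int)
    (hj : j = (if PySem.Chars.findFrom cs ['F','I','R','E'] (i : Int) = -1 then
                 PySem.Chars.findFrom cs ['F','U','R','Y'] (i : Int)
               else if PySem.Chars.findFrom cs ['F','U','R','Y'] (i : Int) = -1 then
                 PySem.Chars.findFrom cs ['F','I','R','E'] (i : Int)
               else min (PySem.Chars.findFrom cs ['F','I','R','E'] (i : Int))
                        (PySem.Chars.findFrom cs ['F','U','R','Y'] (i : Int)))) :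
    (i : Int) ≤ j ∧ j.toNat + 4 ≤ cs.length ∧
    PySem.List.slice cs (some j) (some (j + 4)) = (cs.drop j.toNat).take 4 ∧
    ((cs.drop j.toNat).take 4 = ['F','I','R','E'] ∨ (cs.drop j.toNat).take 4 = ['F','U','R','Y']) ∧
    (∀ m, i ≤ m → m < j.toNat → ¬ faf_matchAt cs m) := by
  have main : (i : Int) ≤ j ∧
      (['F','I','R','E'] <+: cs.drop j.toNat ∨ ['F','U','R','Y'] <+: cs.drop j.toNat) ∧
      (∀ m, i ≤ m → m < j.toNat → ¬ faf_matchAt cs m) := by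
    by_cases hf : PySem.Chars.findFrom cs ['F','I','R','E'] (i : Int) = -1
    · by_cases hu : PySem.Chars.findFrom cs ['F','U','R','Y'] (i : Int) = -1
      · exact absurd ⟨hf, hu⟩ hne
      · rw [if_pos hf] at hj
        obtain ⟨h1, h2, h3⟩ := PySem.Chars.findFrom_natCast_spec cs ['F','U','R','Y'] i hi hu
        have hnof : ∀ m, i ≤ m → ¬ ['F','I','R','E'] <+: cs.drop m := fun m hm =>
          faf_prefix_infix cs _ i m hm
            ((PySem.Chars.findFrom_natCast_eq_neg_one_iff cs _ i hi).mp hf)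
        subst hj
        exact ⟨h1, Or.inr h2, fun m hm1 hm2 => by
          rintro (hp | hp)
          · exact hnof m hm1 hp
          · exact h3 m hm1 hm2 hp⟩
    · by_cases hu : PySem.Chars.findFrom cs ['F','U','R','Y'] (i : Int) = -1
      · rw [if_neg hf, if_pos hu] at hj
        obtain ⟨h1, h2, h3⟩ := PySem.Chars.findFrom_natCast_spec cs ['F','I','R','E'] i hi hf
        have hnou : ∀ m, i ≤ m → ¬ ['F','U','R','Y'] <+: cs.drop m := fun m hm =>
          faf_prefix_infix cs _ i m hm
            ((PySem.Chars.findFrom_natCast_eq_neg_one_iff cs _ i hi).mp hu)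
        subst hj
        exact ⟨h1, Or.inl h2, fun m hm1 hm2 => by
          rintro (hp | hp)
          · exact h3 m hm1 hm2 hp
          · exact hnou m hm1 hp⟩
      · rw [if_neg hf, if_neg hu] at hj
        obtain ⟨hf1, hf2, hf3⟩ := PySem.Chars.findFrom_natCast_spec cs ['F','I','R','E'] i hi hf
        obtain ⟨hu1, hu2, hu3⟩ := PySem.Chars.findFrom_natCast_spec cs ['F','U','R','Y'] i hi hu
        rcases le_total (PySem.Chars.findFrom cs ['F','I','R','E'] (i : Int))
            (PySem.Chars.findFrom cs ['F','U','R','Y'] (i : Int)) with hle | hle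
        · rw [min_eq_left hle] at hj
          subst hj
          refine ⟨hf1, Or.inl hf2, fun m hm1 hm2 => ?_⟩
          rintro (hp | hp)
          · exact hf3 m hm1 hm2 hp
          · exact hu3 m hm1 (by omega) hp
        · rw [min_eq_right hle] at hj
          subst hj
          refine ⟨hu1, Or.inr hu2, fun m hm1 hm2 => ?_⟩
          rintro (hp | hp)
          · exact hf3 m hm1 (by omega) hp
          · exact hu3 m hm1 (by omega) hp
  obtain ⟨h1, h2, h3⟩ := main
  have hlen : j.toNat + 4 ≤ cs.length := by
    have h4 : 4 ≤ (cs.drop j.toNat).length := by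
      rcases h2 with hp | hp
      · simpa using hp.length_le
      · simpa using hp.length_le
    rw [List.length_drop] at h4
    omega
  have hslice : PySem.List.slice cs (some j) (some (j + 4)) = (cs.drop j.toNat).take 4 := by
    have h0 : 0 ≤ j := le_trans (by positivity) h1
    rw [show j = ((j.toNat : Nat) : Int) from by omega,
      show (((j.toNat : Nat) : Int) + 4) = ((j.toNat : Nat) : Int) + ((4 : Nat) : Int) from by
        norm_num,
      PySem.List.slice_natCast_add]
    rw [Int.toNat_natCast]
  refine ⟨h1, hlen, hslice, ?_, h3⟩
  rcases h2 with hp | hp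
  · exact Or.inl (List.prefix_iff_eq_take.mp hp).symm
  · exact Or.inr (List.prefix_iff_eq_take.mp hp).symm

-- no token at or after i when both finds fail
theorem faf_no_token (cs : List Char) (i : Nat) (hi : i ≤ cs.length)
    (hf : PySem.Chars.findFrom cs ['F','I','R','E'] (i : Int) = -1)
    (hu : PySem.Chars.findFrom cs ['F','U','R','Y'] (i : Int) = -1) :
    faf_tokens (cs.drop i) = [] := by
  apply faf_tokens_nil_of_no_match
  intro m
  rintro (hp | hp)
  · rw [List.drop_drop] at hp
    exact faf_prefix_infix cs _ i (i + m) (by omega)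
      ((PySem.Chars.findFrom_natCast_eq_neg_one_iff cs _ i hi).mp hf) hp
  · rw [List.drop_drop] at hp
    exact faf_prefix_infix cs _ i (i + m) (by omega)
      ((PySem.Chars.findFrom_natCast_eq_neg_one_iff cs _ i hi).mp hu) hp

-- the loop invariant: what remains to be emitted is the runs of the remaining tokens
theorem faf_loopB_spec (cs : List Char) :
    ∀ (fuel i : Nat) (word : Option (List Char)) (count : Int) (pieces : List (List Char)),
      i ≤ cs.length → cs.length - i < fuel →
      (word = none ∨ ∃ w, word = some w ∧ (w = ['F','I','R','E'] ∨ w = ['F','U','R','Y'])) →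
      faf_loopB cs fuel i word count pieces
        = pieces ++ (faf_stateRuns word count (faf_tokens (cs.drop i))).map faf_piece := by
  intro fuel
  induction fuel with
  | zero => intro i _ _ _ hi hfuel _; omega
  | succ fuel ih =>
    intro i word count pieces hi hfuel hinv
    simp only [faf_loopB]
    by_cases hb : PySem.Chars.findFrom cs ['F','I','R','E'] (i : Int) = -1 ∧
        PySem.Chars.findFrom cs ['F','U','R','Y'] (i : Int) = -1
    · rw [if_pos hb, faf_no_token cs i hi hb.1 hb.2]
      rcases hinv with h | ⟨w, hww, hw2⟩
      · subst h; rw [faf_flush_none]; simp [faf_stateRuns, faf_groupRuns]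
      · subst hww; rw [faf_flush_some _ _ _ hw2]; simp [faf_stateRuns, faf_groupAux]
    · rw [if_neg hb]
      set J := (if PySem.Chars.findFrom cs ['F','I','R','E'] (i : Int) = -1 then
                  PySem.Chars.findFrom cs ['F','U','R','Y'] (i : Int)
                else if PySem.Chars.findFrom cs ['F','U','R','Y'] (i : Int) = -1 then
                  PySem.Chars.findFrom cs ['F','I','R','E'] (i : Int)
                else min (PySem.Chars.findFrom cs ['F','I','R','E'] (i : Int))
                         (PySem.Chars.findFrom cs ['F','U','R','Y'] (i : Int))) with hJ
      obtain ⟨h1, hlen, hslice, hw4, hmin⟩ := faf_next cs i hi hb J hJ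
      have hiJ : i ≤ J.toNat := by omega
      have htok : faf_tokens (cs.drop i)
          = (cs.drop J.toNat).take 4 :: faf_tokens (cs.drop (J.toNat + 4)) := by
        calc faf_tokens (cs.drop i)
            = faf_tokens ((cs.drop i).drop (J.toNat - i)) := by
              refine faf_tokens_drop_of_no_match _ _ (fun m hm => ?_)
              unfold faf_matchAt
              rw [List.drop_drop]
              exact hmin (i + m) (by omega) (by omega)
          _ = faf_tokens (cs.drop J.toNat) := by
              rw [List.drop_drop, show i + (J.toNat - i) = J.toNat from by omega]
          _ = (cs.drop J.toNat).take 4 :: faf_tokens ((cs.drop J.toNat).drop 4) :=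
              faf_tokens_step _ _ hw4 rfl
          _ = (cs.drop J.toNat).take 4 :: faf_tokens (cs.drop (J.toNat + 4)) := by
              rw [List.drop_drop, show J.toNat + 4 = 4 + J.toNat from by omega]
      rw [hslice]
      by_cases hsw : some ((cs.drop J.toNat).take 4) = word
      · rw [if_pos hsw,
          ih (J.toNat + 4) word (count + 1) pieces (by omega) (by omega) hinv, htok, ← hsw]
        simp only [faf_stateRuns]
        rw [faf_groupAux, if_pos rfl]
      · rw [if_neg hsw,
          ih (J.toNat + 4) (some ((cs.drop J.toNat).take 4)) 1 (faf_flush word count pieces)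
            (by omega) (by omega) (Or.inr ⟨_, rfl, hw4⟩), htok]
        rcases hinv with h | ⟨w, hww, hw2⟩
        · subst h
          rw [faf_flush_none]
          simp only [faf_stateRuns, faf_groupRuns]
        · subst hww
          rw [faf_flush_some _ _ _ hw2]
          have hne2 : ¬ ((cs.drop J.toNat).take 4 = w) := fun h => hsw (by rw [h])
          simp only [faf_stateRuns]
          rw [faf_groupAux, if_neg hne2]
          simp

-- B's validity test is A's
theorem faf_diff_nil_iff (cs : List Char) :
    PySem.Set.diff (PySem.Set.ofList cs) ['E','F','I','R','U','Y'] = [] ↔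
      cs.any (fun x => !([ 'E','F','I','R','U','Y' ].contains x)) = false := by
  rw [List.eq_nil_iff_forall_not_mem]
  constructor
  · intro h
    rw [List.any_eq_false]
    intro x hx
    have := h x
    rw [PySem.Set.mem_diff, PySem.Set.mem_ofList] at this
    simp only [Bool.not_eq_true', Bool.not_eq_false]
    by_contra hc
    exact this ⟨hx, by simpa using hc⟩
  · intro h y
    rw [PySem.Set.mem_diff, PySem.Set.mem_ofList]
    rintro ⟨hy, hny⟩
    have := (List.any_eq_false).mp h y hy
    simp only [Bool.not_eq_true', Bool.not_eq_false] at this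
    exact hny (by simpa using this)

-- ===== VERDICT (by name: the statement is the Claim_ definition above) =====
theorem fire_and_fury_spec : Claim_equal_fire_and_fury := by
  intro tweet _
  unfold Spec_fire_and_fury fire_and_fury fire_and_fury_alt
  have hsl : faf_strList tweet = faf_groupRuns (faf_tokens tweet.toList) := by
    unfold faf_strList
    rw [show PySem.Str.len tweet = (tweet.toList.length : Int) from rfl,
      faf_strList_eq_scan, faf_scan_eq_foldl_push, faf_foldl_push_eq_groupRuns]
  have hloop : faf_loopB tweet.toList (tweet.toList.length + 1) 0 none 0 []
      = (faf_groupRuns (faf_tokens tweet.toList)).map faf_piece := by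
    have := faf_loopB_spec tweet.toList (tweet.toList.length + 1) 0 none 0 []
      (Nat.zero_le _) (by omega) (Or.inl rfl)
    simpa [faf_stateRuns] using this
  rw [hsl]
  simp only [hloop]
  by_cases hbad : tweet.toList.any (fun x => !([ 'E','F','I','R','U','Y' ].contains x)) = true
  · have hdne : PySem.Set.diff (PySem.Set.ofList tweet.toList) ['E','F','I','R','U','Y'] ≠ [] := by
      intro hnil
      rw [(faf_diff_nil_iff tweet.toList).mp hnil] at hbad
      simp at hbad
    rw [if_pos (Or.inr hbad), if_pos hdne]
  · have hdiff : PySem.Set.diff (PySem.Set.ofList tweet.toList) ['E','F','I','R','U','Y'] = [] :=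
      (faf_diff_nil_iff tweet.toList).mpr (by simpa using hbad)
    by_cases hnil : faf_tokens tweet.toList = []
    · rw [if_pos (Or.inl ((faf_groupRuns_eq_nil_iff _).mpr hnil)),
        if_neg (show ¬ _ ≠ _ from fun h => h hdiff),
        if_pos (show (faf_groupRuns (faf_tokens tweet.toList)).map faf_piece = [] by
          rw [hnil]; rfl)]
    · rw [if_neg (show ¬ (faf_groupRuns (faf_tokens tweet.toList) = [] ∨ _) by
          rintro (h | h)
          · exact hnil ((faf_groupRuns_eq_nil_iff _).mp h)
          · rw [h] at hbad; exact hbad rfl),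
        if_neg (show ¬ _ ≠ _ from fun h => h hdiff),
        if_neg (show ¬ (faf_groupRuns (faf_tokens tweet.toList)).map faf_piece = [] by
          simp only [List.map_eq_nil_iff]
          exact fun h => hnil ((faf_groupRuns_eq_nil_iff _).mp h))]
      have hinv : ∀ p ∈ faf_groupRuns (faf_tokens tweet.toList), faf_runInv p :=
        faf_groupRuns_inv _ (faf_tokens_mem _)
      have hres := faf_res_map_cap (faf_groupRuns (faf_tokens tweet.toList)) [] hinv
      simp only [List.map_nil, List.nil_append] at hres
      unfold faf_resA
      rw [hres]
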